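-- pv_equiv track=rewrite | github.com/Cheedge/LeetCode_Honing | Leetcode/985.py | sumEvenAfterQueries1
-- ===== SOURCE A (Python) =====
-- from typing import List
--
-- def sumEvenAfterQueries1(
--     nums: List[int], queries: List[List[int]]
-- ) -> List[int]:
--     n = len(queries)
--     sm = sum(filter(lambda x: x % 2 == 0, nums))
--     res = list()
--     for i in range(n):
--         val, idx = queries[i]
--         if nums[idx] % 2 == 0:
--             if val % 2 == 0:
--                 sm += val
--                 res.append(sm)
--             else:
--                 sm -= nums[idx]
--                 res.append(sm)
--         else:
--             if val % 2 == 0: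
--                 res.append(sm)
--             else:
--                 sm += nums[idx] + val
--                 res.append(sm)
--         nums[idx] += val
--     return res
-- ===== SOURCE B (Python) =====
-- from typing import List
--
-- def sumEvenAfterQueries1(
--     nums: List[int], queries: List[List[int]]
-- ) -> List[int]:
--     res = []
--     for val, idx in queries:
--         nums[idx] += val
--         res.append(sum(x for x in nums if x % 2 == 0))
--     return res
-- ===== Notes on version B (the rewrite author's own statement) =====
-- stated objective: simpler
-- what changed: B drops A's incremental even-sum bookkeeping and four-way parity case analysis entirely: it just applies each update in place and recomputes the even-sum by a full rescan of nums per query.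
import Mathlib
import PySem

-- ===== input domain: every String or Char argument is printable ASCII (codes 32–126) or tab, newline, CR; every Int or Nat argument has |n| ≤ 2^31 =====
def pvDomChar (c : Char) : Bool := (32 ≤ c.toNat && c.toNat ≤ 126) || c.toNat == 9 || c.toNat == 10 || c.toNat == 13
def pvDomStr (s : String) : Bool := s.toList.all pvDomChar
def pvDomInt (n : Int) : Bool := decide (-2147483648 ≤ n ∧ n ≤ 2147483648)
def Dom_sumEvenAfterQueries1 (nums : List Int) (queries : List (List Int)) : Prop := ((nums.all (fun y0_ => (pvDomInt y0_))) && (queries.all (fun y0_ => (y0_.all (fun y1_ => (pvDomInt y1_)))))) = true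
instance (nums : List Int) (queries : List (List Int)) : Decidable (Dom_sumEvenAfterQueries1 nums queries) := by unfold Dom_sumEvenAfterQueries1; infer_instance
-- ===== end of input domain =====

-- B replaces A's incremental even-sum bookkeeping with a full even-sum rescan of nums
-- after each in-place update (objective: simpler; slower, O(n·q)). Both A and B mutate
-- nums in place identically; the equivalence proved here is about the return value.

-- ===== PORT A =====
-- loop body of A: state = (nums, sm, res); branches in A's order
def pvStepA (st : List Int × Int × List Int) (q : List Int) : List Int × Int × List Int :=
  let ns := st.1
  let sm := st.2.1
  let res := st.2.2
  let val := PySem.List.pyGetD q 0 0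
  let idx := PySem.List.pyGetD q 1 0
  let cur := PySem.List.pyGetD ns idx 0
  let p : Int × List Int :=
    if PySem.Int.mod cur 2 == 0 then
      if PySem.Int.mod val 2 == 0 then (sm + val, res ++ [sm + val])
      else (sm - cur, res ++ [sm - cur])
    else
      if PySem.Int.mod val 2 == 0 then (sm, res ++ [sm])
      else (sm + cur + val, res ++ [sm + cur + val])
  (PySem.List.pySetD ns idx (cur + val), p.1, p.2)

def sumEvenAfterQueries1 (nums : List Int) (queries : List (List Int)) : List Int :=
  -- sm = sum(filter(lambda x: x % 2 == 0, nums))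
  let sm0 : Int := (nums.filter (fun x => PySem.Int.mod x 2 == 0)).sum
  (queries.foldl pvStepA (nums, sm0, [])).2.2

-- ===== PORT B =====
-- sum(x for x in nums if x % 2 == 0)
def pvEvenSum (xs : List Int) : Int :=
  xs.foldl (fun s x => if PySem.Int.mod x 2 == 0 then s + x else s) 0

-- loop body of B: state = (nums, res); update first, then rescan
def pvStepB (st : List Int × List Int) (q : List Int) : List Int × List Int :=
  let val := PySem.List.pyGetD q 0 0
  let idx := PySem.List.pyGetD q 1 0
  let ns := PySem.List.pySetD st.1 idx (PySem.List.pyGetD st.1 idx 0 + val)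
  (ns, st.2 ++ [pvEvenSum ns])

def sumEvenAfterQueries1_alt (nums : List Int) (queries : List (List Int)) : List Int :=
  (queries.foldl pvStepB (nums, ([] : List Int))).2

-- ===== PRECONDITION & SPEC =====
-- Pre_ excludes exactly the inputs where A raises: a query that is not a pair
-- (unpacking 'val, idx = queries[i]' raises ValueError) or whose index is out of
-- range for nums (IndexError; Python negative indices -len..-1 are in range).
def Pre_sumEvenAfterQueries1 (nums : List Int) (queries : List (List Int)) : Prop :=
  ∀ q ∈ queries, q.length = 2 ∧ PySem.Raise.InRange nums.length (PySem.List.pyGetD q 1 0)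
instance (nums : List Int) (queries : List (List Int)) : Decidable (Pre_sumEvenAfterQueries1 nums queries) := by unfold Pre_sumEvenAfterQueries1; infer_instance

def pvWitness_sumEvenAfterQueries1 : List Int × List (List Int) := ([1, 2, 3, 4], [[1, 0], [-3, 1], [-4, 0], [2, 3]])

def Spec_sumEvenAfterQueries1 (nums : List Int) (queries : List (List Int)) (out : List Int) : Prop := out = sumEvenAfterQueries1_alt nums queries
instance (nums : List Int) (queries : List (List Int)) (out : List Int) : Decidable (Spec_sumEvenAfterQueries1 nums queries out) := by unfold Spec_sumEvenAfterQueries1; infer_instance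

-- ===== CLAIM (what is proved, stated in full; the proofs are below) =====
def Claim_equal_sumEvenAfterQueries1 : Prop := ∀ (nums : List Int) (queries : List (List Int)), Dom_sumEvenAfterQueries1 nums queries → Pre_sumEvenAfterQueries1 nums queries → Spec_sumEvenAfterQueries1 nums queries (sumEvenAfterQueries1 nums queries)

-- ===== LEMMAS AND PROOFS =====

-- Python's x % 2 == 0 is evenness in Int.emod terms
theorem pv_mod2 (x : Int) : (PySem.Int.mod x 2 == 0) = decide (x % 2 = 0) := by
  simp only [PySem.Int.mod, Int.fmod_eq_emod]
  by_cases h : x % 2 = 0 <;> simp [h]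

theorem pvEvenSum_shift (xs : List Int) (s : Int) :
    xs.foldl (fun s x => if PySem.Int.mod x 2 == 0 then s + x else s) s
      = s + pvEvenSum xs := by
  induction xs generalizing s with
  | nil => simp [pvEvenSum]
  | cons x xs ih =>
    simp only [pvEvenSum, List.foldl_cons] at *
    rw [ih, ih (if PySem.Int.mod x 2 == 0 then 0 + x else 0)]
    split_ifs <;> ring

theorem pvEvenSum_cons (x : Int) (xs : List Int) :
    pvEvenSum (x :: xs) = (if x % 2 = 0 then x else 0) + pvEvenSum xs := by
  rw [pvEvenSum, List.foldl_cons, pvEvenSum_shift, pv_mod2]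
  by_cases h : x % 2 = 0 <;> simp [h]

theorem pvEvenSum_eq_filter_sum (xs : List Int) :
    (xs.filter (fun x => PySem.Int.mod x 2 == 0)).sum = pvEvenSum xs := by
  induction xs with
  | nil => simp [pvEvenSum]
  | cons x xs ih =>
    rw [pvEvenSum_cons, List.filter_cons, pv_mod2]
    by_cases h : x % 2 = 0
    · rw [if_pos (by simp [h]), if_pos h, List.sum_cons, ih]
    · rw [if_neg (by simp [h]), if_neg h, ih, zero_add]

-- resolving a Python index (possibly negative) to a Nat position
theorem pv_idx_resolve (len : Nat) (i : Int) (h : PySem.Raise.InRange len i) :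
    ∃ n : Nat, n < len ∧ PySem.List.pyIdx? len i = some n := by
  obtain ⟨h1, h2⟩ := h
  by_cases h0 : 0 ≤ i
  · exact ⟨i.toNat, by omega, by simp [PySem.List.pyIdx?, h0, h2]⟩
  · exact ⟨len - (-i).toNat, by omega, by simp [PySem.List.pyIdx?, h0, h1]⟩

theorem pv_pyGetD_resolve {xs : List Int} {i : Int} {n : Nat}
    (hidx : PySem.List.pyIdx? xs.length i = some n) (d : Int) :
    PySem.List.pyGetD xs i d = xs.getD n d := by
  simp [PySem.List.pyGetD, PySem.List.pyGet?, hidx, List.getD_eq_getElem?_getD]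

theorem pv_pySetD_resolve {xs : List Int} {i : Int} {n : Nat}
    (hidx : PySem.List.pyIdx? xs.length i = some n) (v : Int) :
    PySem.List.pySetD xs i v = xs.set n v := by
  simp [PySem.List.pySetD, PySem.List.pySet?, hidx]

theorem pvEvenSum_set (xs : List Int) (n : Nat) (v : Int) (h : n < xs.length) :
    pvEvenSum (xs.set n v)
      = pvEvenSum xs - (if xs.getD n 0 % 2 = 0 then xs.getD n 0 else 0)
          + (if v % 2 = 0 then v else 0) := by
  induction xs generalizing n with
  | nil => simp at h
  | cons x xs ih =>
    cases n with
    | zero => simp only [List.set, pvEvenSum_cons, List.getD_cons_zero]; ring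
    | succ m =>
      simp only [List.set, pvEvenSum_cons, List.getD_cons_succ]
      rw [ih m (by simpa using h)]
      ring

-- one query step: A's incremental sm stays equal to the even-sum of the updated nums
theorem pv_step_eq (ns : List Int) (res : List Int) (q : List Int)
    (h : PySem.Raise.InRange ns.length (PySem.List.pyGetD q 1 0)) :
    pvStepA (ns, pvEvenSum ns, res) q
      = ((pvStepB (ns, res) q).1, pvEvenSum (pvStepB (ns, res) q).1, (pvStepB (ns, res) q).2) := by
  obtain ⟨n, hn, hidx⟩ := pv_idx_resolve ns.length _ h
  simp only [pvStepA, pvStepB]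
  rw [pv_pyGetD_resolve hidx, pv_pySetD_resolve hidx]
  rw [pvEvenSum_set ns n _ hn]
  simp only [pv_mod2]
  set c := ns.getD n 0 with hc
  set v := PySem.List.pyGetD q 0 0 with hv
  split_ifs <;> simp_all <;> omega

theorem pv_length_stepB (st : List Int × List Int) (q : List Int) :
    ((pvStepB st q).1).length = st.1.length := by
  simp [pvStepB, PySem.List.length_pySetD]

theorem pv_main (qs : List (List Int)) :
    ∀ (ns : List Int) (res : List Int),
      (∀ q ∈ qs, PySem.Raise.InRange ns.length (PySem.List.pyGetD q 1 0)) →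
      qs.foldl pvStepA (ns, pvEvenSum ns, res)
        = ((qs.foldl pvStepB (ns, res)).1,
           pvEvenSum (qs.foldl pvStepB (ns, res)).1,
           (qs.foldl pvStepB (ns, res)).2) := by
  induction qs with
  | nil => intro ns res _; simp
  | cons q qs ih =>
    intro ns res h
    have hq := h q (by simp)
    simp only [List.foldl_cons]
    rw [pv_step_eq ns res q hq]
    exact ih _ _ (fun q' hq' => by
      rw [pv_length_stepB]; exact h q' (by simp [hq']))

-- ===== VERDICT (by name: the statement is the Claim_ definition above) =====
theorem sumEvenAfterQueries1_spec : Claim_equal_sumEvenAfterQueries1 := by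
  intro nums queries _ hpre
  have h := pv_main queries nums [] (fun q hq => (hpre q hq).2)
  simp only [Spec_sumEvenAfterQueries1, sumEvenAfterQueries1, sumEvenAfterQueries1_alt,
    pvEvenSum_eq_filter_sum, h]
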